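-- pv_equiv track=rewrite | github.com/rahmanhabib010/5G_code | python_helper_scripts/kpi-plotter/kpi_plotter.py | trim_list
-- ===== SOURCE A (Python) =====
-- def trim_list(lst, limit):
--     # Initialize pointers
--     left = 0
--     right = len(lst) - 1
--
--     # Move the left pointer to the first element greater than 5
--     while left <= right and lst[left] <= limit:
--         left += 1
--
--     # Move the right pointer to the last element greater than 5
--     while left <= right and lst[right] <= limit:
--         right -= 1
--
--     # Return the trimmed list using slicing
--     return lst[left:right+1]
-- ===== SOURCE B (Python) =====
-- def trim_list(lst, limit):
--     keep = [i for i, x in enumerate(lst) if x > limit]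
--     if not keep:
--         return lst[0:0]
--     return lst[keep[0]:keep[-1] + 1]
-- ===== Notes on version B (the rewrite author's own statement) =====
-- stated objective: simpler
-- what changed: Replaces the two inward-walking pointer loops with a single enumerate pass collecting the indices of elements > limit, then one slice from the first to the last kept index.
import Mathlib
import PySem

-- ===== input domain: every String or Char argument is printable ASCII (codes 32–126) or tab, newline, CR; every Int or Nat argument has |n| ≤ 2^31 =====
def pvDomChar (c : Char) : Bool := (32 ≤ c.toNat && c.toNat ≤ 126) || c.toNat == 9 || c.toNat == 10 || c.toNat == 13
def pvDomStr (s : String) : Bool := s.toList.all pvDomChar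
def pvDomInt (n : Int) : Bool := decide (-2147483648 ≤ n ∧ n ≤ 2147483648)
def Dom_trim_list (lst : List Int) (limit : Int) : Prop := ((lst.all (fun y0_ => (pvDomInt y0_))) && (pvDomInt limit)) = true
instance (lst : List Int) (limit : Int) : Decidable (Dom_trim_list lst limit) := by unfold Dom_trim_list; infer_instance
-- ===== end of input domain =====

-- B replaces A's two inward-walking pointer loops by one enumerate pass that
-- collects the indices of elements > limit, followed by a single slice (simpler).

-- ===== PORT A =====
-- while left <= right and lst[left] <= limit: left += 1
-- (fuel = lst.length + 1 bounds the number of guard checks; it is never exhausted)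
def trimLeftLoop (lst : List Int) (limit : Int) : Nat → Int → Int → Int
  | 0, left, _right => left
  | fuel + 1, left, right =>
    if (left ≤ right ∧ ((PySem.List.pyGet? lst left).getD 0) ≤ limit) then
      trimLeftLoop lst limit fuel (left + 1) right
    else
      left

-- while left <= right and lst[right] <= limit: right -= 1
def trimRightLoop (lst : List Int) (limit : Int) : Nat → Int → Int → Int
  | 0, _left, right => right
  | fuel + 1, left, right =>
    if (left ≤ right ∧ ((PySem.List.pyGet? lst right).getD 0) ≤ limit) then
      trimRightLoop lst limit fuel left (right - 1)
    else
      right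

def trim_list (lst : List Int) (limit : Int) : List Int :=
  let left := trimLeftLoop lst limit (lst.length + 1) 0 ((lst.length : Int) - 1)
  let right := trimRightLoop lst limit (lst.length + 1) left ((lst.length : Int) - 1)
  PySem.List.slice lst (some left) (some (right + 1))

-- ===== PORT B =====
def trim_list_alt (lst : List Int) (limit : Int) : List Int :=
  let keep := ((PySem.List.enumerate lst).filter (fun p => limit < p.2)).map (·.1)
  match keep with
  | [] => PySem.List.slice lst (some 0) (some 0)
  | i :: rest => PySem.List.slice lst (some i) (some (rest.getLastD i + 1))

-- ===== PRECONDITION & SPEC =====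
def Spec_trim_list (lst : List Int) (limit : Int) (out : List Int) : Prop := out = trim_list_alt lst limit
instance (lst : List Int) (limit : Int) (out : List Int) : Decidable (Spec_trim_list lst limit out) := by unfold Spec_trim_list; infer_instance

-- ===== CLAIM (what is proved, stated in full; the proofs are below) =====
def Claim_equal_trim_list : Prop := ∀ (lst : List Int) (limit : Int), Dom_trim_list lst limit → Spec_trim_list lst limit (trim_list lst limit)

-- ===== LEMMAS AND PROOFS =====

-- helper: B's keep list rewritten as a filtered index range (Nat form)
def pvKrange (lst : List Int) (limit : Int) : List Nat :=
  (List.range lst.length).filter (fun i => decide (limit < lst.getD i 0))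

theorem pvKeep_gen (limit : Int) (lst : List Int) : ∀ (s : Int),
    ((PySem.List.enumerate lst s).filter (fun p => limit < p.2)).map (·.1)
    = (pvKrange lst limit).map (fun (i : Nat) => s + (i : Int)) := by
  induction lst with
  | nil => intro s; simp [pvKrange, PySem.List.enumerate_nil]
  | cons x xs ih =>
    intro s
    simp only [pvKrange, PySem.List.enumerate_cons, List.length_cons,
      List.range_succ_eq_map, List.filter_cons]
    have hmap : ∀ (l : List Nat),
        (l.map Nat.succ).map (fun (i : Nat) => s + (i : Int))
        = l.map (fun (i : Nat) => (s + 1) + (i : Int)) := by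
      intro l
      rw [List.map_map]
      apply List.map_congr_left
      intro i _
      simp [Nat.succ_eq_add_one]
      ring
    by_cases h : limit < x
    · simp only [h, decide_true, if_true, List.map_cons, List.filter_map]
      rw [ih (s + 1)]
      simp only [pvKrange, List.getD_cons_zero, h, decide_true, if_true, List.map_cons]
      rw [← hmap]
      simp [List.map_map, Function.comp_def]
      rfl
    · simp only [h, decide_false, Bool.false_eq_true, if_false, List.filter_map]
      rw [ih (s + 1)]
      simp only [pvKrange, List.getD_cons_zero, h, decide_false, Bool.false_eq_true, if_false]
      rw [← hmap]
      simp [List.map_map, Function.comp_def]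
      rfl

theorem pvKeep_eq (lst : List Int) (limit : Int) :
    ((PySem.List.enumerate lst).filter (fun p => limit < p.2)).map (·.1)
    = (pvKrange lst limit).map (fun (i : Nat) => (i : Int)) := by
  simpa using pvKeep_gen limit lst 0

-- value fetched by the loops at a valid Nat index
theorem pvGet_loop (lst : List Int) (a : Nat) (ha : a < lst.length) :
    ((PySem.List.pyGet? lst (a : Int)).getD 0) = lst.getD a 0 := by
  simp [PySem.List.pyGet?_natCast, List.getD, List.getElem?_eq_getElem ha]

-- left loop: stops at j, the first index ≥ a whose element exceeds limit
theorem trimLeftLoop_eq (lst : List Int) (limit : Int) (j : Nat) (hj : j < lst.length)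
    (hq : limit < lst.getD j 0) :
    ∀ (f a : Nat), a ≤ j → j - a < f → (∀ i, a ≤ i → i < j → ¬ limit < lst.getD i 0) →
    trimLeftLoop lst limit f (a : Int) ((lst.length : Int) - 1) = (j : Int) := by
  intro f
  induction f with
  | zero => intro a _ hf; omega
  | succ f ih =>
    intro a ha hf hmin
    rw [trimLeftLoop]
    by_cases haj : a = j
    · subst haj
      rw [if_neg]
      intro ⟨_, h2⟩
      rw [pvGet_loop lst a hj] at h2
      omega
    · have h2 : ((PySem.List.pyGet? lst (a : Int)).getD 0) ≤ limit := by
        rw [pvGet_loop lst a (by omega)]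
        have := hmin a (le_refl a) (by omega)
        omega
      rw [if_pos ⟨by omega, h2⟩]
      have hc : ((a : Int) + 1) = ((a + 1 : Nat) : Int) := by push_cast; ring
      rw [hc]
      exact ih (a + 1) (by omega) (by omega) (fun i h1 h2 => hmin i (by omega) h2)

-- left loop when no element beyond a exceeds limit: runs to length
theorem trimLeftLoop_none (lst : List Int) (limit : Int) :
    ∀ (f a : Nat), a ≤ lst.length → lst.length - a < f →
    (∀ i, a ≤ i → i < lst.length → ¬ limit < lst.getD i 0) →
    trimLeftLoop lst limit f (a : Int) ((lst.length : Int) - 1) = (lst.length : Int) := by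
  intro f
  induction f with
  | zero => intro a _ hf; omega
  | succ f ih =>
    intro a ha hf hall
    rw [trimLeftLoop]
    by_cases han : a = lst.length
    · subst han
      rw [if_neg]
      intro ⟨h1, _⟩
      omega
    · have h2 : ((PySem.List.pyGet? lst (a : Int)).getD 0) ≤ limit := by
        rw [pvGet_loop lst a (by omega)]
        have := hall a (le_refl a) (by omega)
        omega
      rw [if_pos ⟨by omega, h2⟩]
      have hc : ((a : Int) + 1) = ((a + 1 : Nat) : Int) := by push_cast; ring
      rw [hc]
      exact ih (a + 1) (by omega) (by omega) (fun i h1 h2 => hall i (by omega) h2)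

-- right loop: stops at k, the last index ≤ b whose element exceeds limit
theorem trimRightLoop_eq (lst : List Int) (limit : Int) (l : Int) (k : Nat)
    (hk : k < lst.length) (hq : limit < lst.getD k 0) (hl : l ≤ (k : Int)) :
    ∀ (f b : Nat), k ≤ b → b < lst.length → b - k < f →
    (∀ i, k < i → i ≤ b → ¬ limit < lst.getD i 0) →
    trimRightLoop lst limit f l (b : Int) = (k : Int) := by
  intro f
  induction f with
  | zero => intro b _ _ hf; omega
  | succ f ih =>
    intro b hkb hb hf hmax
    rw [trimRightLoop]
    by_cases hbk : b = k
    · subst hbk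
      rw [if_neg]
      intro ⟨_, h2⟩
      rw [pvGet_loop lst b hk] at h2
      omega
    · have h2 : ((PySem.List.pyGet? lst (b : Int)).getD 0) ≤ limit := by
        rw [pvGet_loop lst b hb]
        have := hmax b (by omega) (le_refl b)
        omega
      rw [if_pos ⟨by omega, h2⟩]
      have hc : ((b : Int) - 1) = ((b - 1 : Nat) : Int) := by omega
      rw [hc]
      exact ih (b - 1) (by omega) (by omega) (by omega)
        (fun i h1 h2 => hmax i h1 (by omega))

theorem mem_pvKrange (lst : List Int) (limit : Int) (i : Nat) :
    i ∈ pvKrange lst limit ↔ i < lst.length ∧ limit < lst.getD i 0 := by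
  simp [pvKrange]

theorem pairwise_pvKrange (lst : List Int) (limit : Int) :
    (pvKrange lst limit).Pairwise (· < ·) :=
  List.Pairwise.filter _ (List.pairwise_lt_range)

theorem le_getLast_of_pairwise : ∀ (l : List Nat), l.Pairwise (· < ·) →
    ∀ (x : Nat), x ∈ l → ∀ (h : l ≠ []), x ≤ l.getLast h := by
  intro l
  induction l with
  | nil => intro _ x hx; cases hx
  | cons a t ih =>
    intro hp x hx h
    by_cases ht : t = []
    · subst ht
      simp at hx
      simp [hx]
    · rw [List.getLast_cons ht]
      rcases List.mem_cons.mp hx with rfl | hxt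
      · have hm := (List.pairwise_cons.mp hp).1 (t.getLast ht) (List.getLast_mem ht)
        omega
      · exact ih (List.pairwise_cons.mp hp).2 x hxt ht

theorem getLastD_map_cast (l : List Nat) : ∀ (a : Nat),
    (l.map (fun (i : Nat) => (i : Int))).getLastD (a : Int) = ((l.getLastD a : Nat) : Int) := by
  induction l with
  | nil => intro a; rfl
  | cons x t ih =>
    intro a
    rw [List.map_cons, List.getLastD_cons, List.getLastD_cons]
    exact ih x

theorem getLastD_eq_getLast_cons : ∀ (a : Nat) (l : List Nat),
    l.getLastD a = (a :: l).getLast (by simp) := by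
  intro a l
  induction l generalizing a with
  | nil => rfl
  | cons x t ih =>
    rw [List.getLastD_cons, ih x]
    exact (List.getLast_cons (by simp)).symm

theorem trim_list_spec' : ∀ (lst : List Int) (limit : Int),
    trim_list lst limit = trim_list_alt lst limit := by
  intro lst limit
  simp only [trim_list, trim_list_alt]
  rw [pvKeep_eq]
  cases hk : pvKrange lst limit with
  | nil =>
    -- no element exceeds limit: both sides are the empty slice
    have hall : ∀ i, 0 ≤ i → i < lst.length → ¬ limit < lst.getD i 0 := by
      intro i _ hi hq
      have : i ∈ pvKrange lst limit := (mem_pvKrange lst limit i).mpr ⟨hi, hq⟩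
      rw [hk] at this; cases this
    have hL : trimLeftLoop lst limit (lst.length + 1) 0 ((lst.length : Int) - 1)
        = (lst.length : Int) := by
      have := trimLeftLoop_none lst limit (lst.length + 1) 0 (by omega) (by omega)
        (fun i h1 h2 => hall i (by omega) h2)
      simpa using this
    rw [hL]
    have hR : trimRightLoop lst limit (lst.length + 1) (lst.length : Int)
        ((lst.length : Int) - 1) = (lst.length : Int) - 1 := by
      cases hn : lst.length + 1 with
      | zero => omega
      | succ m =>
        rw [trimRightLoop, if_neg]
        intro ⟨h1, _⟩
        omega
    rw [hR]
    have hc : ((lst.length : Int) - 1 + 1) = (lst.length : Int) := by ring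
    rw [hc]
    simp [PySem.List.slice]
  | cons j rest =>
    have hpw : (j :: rest).Pairwise (· < ·) := hk ▸ pairwise_pvKrange lst limit
    have hjm : j ∈ pvKrange lst limit := by rw [hk]; simp
    obtain ⟨hjn, hqj⟩ := (mem_pvKrange lst limit j).mp hjm
    have hkd := getLastD_eq_getLast_cons j rest
    have hkm : rest.getLastD j ∈ pvKrange lst limit := by
      rw [hk, hkd]; exact List.getLast_mem _
    obtain ⟨hkn, hqk⟩ := (mem_pvKrange lst limit _).mp hkm
    have hjk : j ≤ rest.getLastD j := by
      rw [hkd]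
      exact le_getLast_of_pairwise (j :: rest) hpw j (by simp) (by simp)
    have hmin : ∀ i, 0 ≤ i → i < j → ¬ limit < lst.getD i 0 := by
      intro i _ hij hq
      have hm : i ∈ pvKrange lst limit :=
        (mem_pvKrange lst limit i).mpr ⟨by omega, hq⟩
      rw [hk] at hm
      rcases List.mem_cons.mp hm with rfl | hr
      · omega
      · have := (List.pairwise_cons.mp hpw).1 i hr
        omega
    have hmax : ∀ i, rest.getLastD j < i → i ≤ lst.length - 1 → ¬ limit < lst.getD i 0 := by
      intro i hki hi hq
      have hm : i ∈ pvKrange lst limit :=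
        (mem_pvKrange lst limit i).mpr ⟨by omega, hq⟩
      rw [hk] at hm
      have := le_getLast_of_pairwise (j :: rest) hpw i hm (by simp)
      rw [← hkd] at this
      omega
    have hL : trimLeftLoop lst limit (lst.length + 1) 0 ((lst.length : Int) - 1)
        = (j : Int) := by
      have := trimLeftLoop_eq lst limit j hjn hqj (lst.length + 1) 0 (by omega) (by omega)
        (fun i h1 h2 => hmin i (by omega) h2)
      simpa using this
    rw [hL]
    have hR : trimRightLoop lst limit (lst.length + 1) (j : Int) ((lst.length : Int) - 1)
        = ((rest.getLastD j : Nat) : Int) := by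
      have hcast : ((lst.length : Int) - 1) = ((lst.length - 1 : Nat) : Int) := by omega
      rw [hcast]
      exact trimRightLoop_eq lst limit (j : Int) (rest.getLastD j) hkn hqk
        (by exact_mod_cast hjk) (lst.length + 1) (lst.length - 1) (by omega) (by omega)
        (by omega) (fun i h1 h2 => hmax i h1 h2)
    rw [hR]
    show PySem.List.slice lst (some (j : Int)) (some (((rest.getLastD j : Nat) : Int) + 1))
      = PySem.List.slice lst (some ((j : Nat) : Int))
          (some (((rest.map (fun (i : Nat) => (i : Int))).getLastD ((j : Nat) : Int)) + 1))
    rw [getLastD_map_cast rest j]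

-- ===== VERDICT (by name: the statement is the Claim_ definition above) =====
theorem trim_list_spec : Claim_equal_trim_list := by
  intro lst limit _
  exact trim_list_spec' lst limit
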